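-- pv_equiv track=rewrite | github.com/tanvu10/DataStructures_and_Algorithms | Two Pointers/homework_3.py | greedy_book
-- ===== SOURCE A (Python) =====
-- def greedy_book(time_array, time_available):
--     # time_array = sorted(time_array)
--     counter = 0
--     for i in range(len(time_array)):
--         if time_available >= time_array[i]:
--             counter += 1
--             time_available = time_available - time_array[i]
--         else:
--             return counter
--     return counter
-- ===== SOURCE B (Python) =====
-- def greedy_book(time_array, time_available):
--     # two-pass: build prefix sums, then count the leading ones within budget
--     prefixes = []
--     total = 0
--     for x in time_array:
--         total += x
--         prefixes.append(total)
--     count = 0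
--     while count < len(prefixes) and prefixes[count] <= time_available:
--         count += 1
--     return count
-- ===== Notes on version B (the rewrite author's own statement) =====
-- stated objective: alternative
-- what changed: Replaces the greedy loop that mutates a remaining budget and early-returns with a two-pass formulation: build the prefix-sum array, then count how many leading prefix sums fit within time_available.
import Mathlib
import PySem

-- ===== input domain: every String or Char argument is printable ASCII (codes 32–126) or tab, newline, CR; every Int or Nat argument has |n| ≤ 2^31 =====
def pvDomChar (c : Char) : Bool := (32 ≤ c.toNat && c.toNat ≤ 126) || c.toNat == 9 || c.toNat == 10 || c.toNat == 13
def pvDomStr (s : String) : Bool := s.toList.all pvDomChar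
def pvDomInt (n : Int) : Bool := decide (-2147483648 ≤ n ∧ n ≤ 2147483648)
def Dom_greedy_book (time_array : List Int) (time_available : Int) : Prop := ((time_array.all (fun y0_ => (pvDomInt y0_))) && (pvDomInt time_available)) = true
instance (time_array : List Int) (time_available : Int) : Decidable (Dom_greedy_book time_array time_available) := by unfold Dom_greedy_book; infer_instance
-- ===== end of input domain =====

-- B replaces A's mutate-remaining greedy loop with prefix sums + count-leading-within-budget (alternative decomposition, same cost).


-- ===== PORT A =====
-- A's for-loop: counter accumulator, mutated remaining budget, early return on the first book that does not fit.
def greedyAux : List Int → Int → Int → Int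
  | [], _, counter => counter
  | x :: xs, avail, counter =>
      if avail ≥ x then greedyAux xs (avail - x) (counter + 1) else counter

def greedy_book (time_array : List Int) (time_available : Int) : Int :=
  greedyAux time_array time_available 0

-- ===== PORT B =====
-- first pass of Source B: running total, append prefix sums
def pvPrefixes : List Int → Int → List Int
  | [], _ => []
  | x :: xs, total => (total + x) :: pvPrefixes xs (total + x)

-- second pass of Source B: count leading prefix sums ≤ budget
def pvCountLeading : List Int → Int → Int
  | [], _ => 0
  | p :: ps, t => if p ≤ t then 1 + pvCountLeading ps t else 0

def greedy_book_alt (time_array : List Int) (time_available : Int) : Int :=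
  pvCountLeading (pvPrefixes time_array 0) time_available

-- ===== PRECONDITION & SPEC =====
def Spec_greedy_book (time_array : List Int) (time_available : Int) (out : Int) : Prop := out = greedy_book_alt time_array time_available
instance (time_array : List Int) (time_available : Int) (out : Int) : Decidable (Spec_greedy_book time_array time_available out) := by unfold Spec_greedy_book; infer_instance

-- ===== CLAIM (what is proved, stated in full; the proofs are below) =====
def Claim_equal_greedy_book : Prop := ∀ (time_array : List Int) (time_available : Int), Dom_greedy_book time_array time_available → Spec_greedy_book time_array time_available (greedy_book time_array time_available)

-- ===== LEMMAS AND PROOFS =====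
theorem greedyAux_eq_count (xs : List Int) : ∀ (t tot c : Int),
    greedyAux xs t c = c + pvCountLeading (pvPrefixes xs tot) (t + tot) := by
  induction xs with
  | nil => intro t tot c; simp [greedyAux, pvPrefixes, pvCountLeading]
  | cons x xs ih =>
      intro t tot c
      simp only [greedyAux, pvPrefixes, pvCountLeading]
      by_cases h : t ≥ x
      · rw [if_pos h, if_pos (by omega : tot + x ≤ t + tot), ih (t - x) (tot + x) (c + 1)]
        have : t - x + (tot + x) = t + tot := by ring
        rw [this]; ring
      · rw [if_neg h, if_neg (by omega : ¬ tot + x ≤ t + tot)]; ring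

-- ===== VERDICT (by name: the statement is the Claim_ definition above) =====
theorem greedy_book_spec : Claim_equal_greedy_book := by
  intro xs t _
  unfold Spec_greedy_book greedy_book greedy_book_alt
  rw [greedyAux_eq_count xs t 0 0]
  ring_nf
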